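-- pv_equiv track=rewrite | github.com/chiphuyen/lazynlp | lazynlp/utils.py | is_positive_number
-- ===== SOURCE A (Python) =====
-- def is_positive_number(string, neg=False):
--     if not string:
--         return False
--     if string.isdigit():
--         return True
--     idx = string.find('.')
--     if idx > -1 and idx < len(string) - 1:
--         if idx == 0 and neg:
--             return False
--         new_string = string[:idx] + string[idx + 1:]
--         if new_string.isdigit():
--             return True
--     rev = string[::-1]
--     idx = rev.find(',')
--
--     while idx > 0 and idx % 3 == 0 and rev[:idx].isdigit():
--         rev = rev[idx + 1:]
--         idx = rev.find(',')
--
--     if idx == -1 and rev.isdigit():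
--         return True
--     return False
-- ===== SOURCE B (Python) =====
-- def is_positive_number(string, neg=False):
--     if not string:
--         return False
--     if string.isdigit():
--         return True
--     i = string.find('.')
--     if -1 < i < len(string) - 1:
--         if i == 0 and neg:
--             return False
--         if (string[:i] + string[i + 1:]).isdigit():
--             return True
--     parts = string.split(',')
--     return (len(parts) >= 2
--             and parts[0].isdigit()
--             and all(p.isdigit() and len(p) % 3 == 0 for p in parts[1:]))
-- ===== Notes on version B (the rewrite author's own statement) =====
-- stated objective: simpler
-- what changed: A's right-to-left strip-and-refind while-loop over the reversed string is replaced by a single split on commas followed by a direct validation of the groups (leading group all digits, every later group all digits with length a positive multiple of 3).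
import Mathlib
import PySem

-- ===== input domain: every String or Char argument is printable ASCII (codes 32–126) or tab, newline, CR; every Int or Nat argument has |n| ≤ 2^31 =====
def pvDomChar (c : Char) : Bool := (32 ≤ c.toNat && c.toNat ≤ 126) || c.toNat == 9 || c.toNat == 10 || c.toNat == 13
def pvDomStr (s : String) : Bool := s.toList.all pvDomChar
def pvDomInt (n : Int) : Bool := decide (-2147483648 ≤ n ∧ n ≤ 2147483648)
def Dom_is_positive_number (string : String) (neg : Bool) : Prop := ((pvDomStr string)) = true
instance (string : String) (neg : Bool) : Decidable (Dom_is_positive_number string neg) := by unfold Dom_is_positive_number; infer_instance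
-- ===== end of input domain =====

-- B replaces A's reverse-scan while-loop over the comma groups by a single split(',')-then-validate pass (simpler, same cost).

-- ===== PORT A =====
-- A's while-loop plus the return after it: rev = rev[idx+1:]; idx = rev.find(',') until the
-- group test fails, then 'idx == -1 and rev.isdigit()'.
def commaLoopA (rev : List Char) : Bool :=
  let idx := PySem.Chars.find rev [',']
  if h : 0 < idx ∧ PySem.Int.mod idx 3 = 0 ∧
      PySem.Chars.strIsdigit (PySem.List.slice rev none (some idx)) = true then
    commaLoopA (PySem.List.slice rev (some (idx + 1)) none)
  else
    idx == -1 && PySem.Chars.strIsdigit rev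
termination_by rev.length
decreasing_by
  rw [PySem.List.slice_from rev (by omega)]
  have hle := PySem.Chars.find_le_length rev [',']
  simp only [List.length_drop]
  omega

def is_positive_number (string : String) (neg : Bool) : Bool :=
  let s := string.toList
  if s.isEmpty then false
  else if PySem.Chars.strIsdigit s then true
  else
    let idx := PySem.Chars.find s ['.']
    if -1 < idx ∧ idx < (s.length : Int) - 1 then
      if idx == 0 && neg then false
      else if PySem.Chars.strIsdigit
          (PySem.List.slice s none (some idx) ++ PySem.List.slice s (some (idx + 1)) none) then true
      -- string[::-1] : slice? with step -1 never fails, hence the getD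
      else commaLoopA ((PySem.List.slice? s none none (-1)).getD [])
    else commaLoopA ((PySem.List.slice? s none none (-1)).getD [])

-- ===== PORT B =====
-- parts = string.split(','); True iff ≥ 2 parts, parts[0] all digits,
-- every later part all digits with length a multiple of 3.
def commaSplitB (s : List Char) : Bool :=
  let parts := PySem.Chars.splitOn s [',']
  decide (2 ≤ parts.length) && PySem.Chars.strIsdigit (parts.headD [])
    && parts.tail.all (fun p => PySem.Chars.strIsdigit p && p.length % 3 == 0)

def is_positive_number_alt (string : String) (neg : Bool) : Bool :=
  let s := string.toList
  if s.isEmpty then false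
  else if PySem.Chars.strIsdigit s then true
  else
    let i := PySem.Chars.find s ['.']
    if -1 < i ∧ i < (s.length : Int) - 1 then
      if i == 0 && neg then false
      else if PySem.Chars.strIsdigit
          (PySem.List.slice s none (some i) ++ PySem.List.slice s (some (i + 1)) none) then true
      else commaSplitB s
    else commaSplitB s

-- ===== PRECONDITION & SPEC =====
def Spec_is_positive_number (string : String) (neg : Bool) (out : Bool) : Prop := out = is_positive_number_alt string neg
instance (string : String) (neg : Bool) (out : Bool) : Decidable (Spec_is_positive_number string neg out) := by unfold Spec_is_positive_number; infer_instance

-- ===== CLAIM (what is proved, stated in full; the proofs are below) =====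
def Claim_equal_is_positive_number : Prop := ∀ (string : String) (neg : Bool), Dom_is_positive_number string neg → Spec_is_positive_number string neg (is_positive_number string neg)

-- ===== LEMMAS AND PROOFS =====

-- simple reference splitter on ',' (proof-side only)
def splitC : List Char → List (List Char)
  | [] => [[]]
  | c :: rest =>
    if c = ',' then [] :: splitC rest
    else
      match splitC rest with
      | [] => [[c]]
      | g :: gs => (c :: g) :: gs

theorem splitC_ne_nil (l : List Char) : splitC l ≠ [] := by
  cases l with
  | nil => simp [splitC]
  | cons c rest =>
    simp only [splitC]
    split
    · simp
    · split <;> simp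

theorem go_comma (fuel : Nat) (l cur : List Char) (acc : List (List Char)) (h : l.length ≤ fuel) :
    PySem.Chars.splitOn.go [','] fuel l cur acc
      = acc.reverse ++ ((cur.reverse ++ (splitC l).headD []) :: (splitC l).tail) := by
  induction fuel generalizing l cur acc with
  | zero =>
    have hl : l = [] := by cases l <;> simp_all
    subst hl
    simp [PySem.Chars.splitOn.go, splitC]
  | succ n ih =>
    cases l with
    | nil => simp [PySem.Chars.splitOn.go, splitC]
    | cons c rest =>
      by_cases hc : c = ','
      · subst hc
        have hstep : PySem.Chars.splitOn.go [','] (n+1) (',' :: rest) cur acc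
            = PySem.Chars.splitOn.go [','] n rest [] (cur.reverse :: acc) := by
          simp [PySem.Chars.splitOn.go, List.isPrefixOf]
        rw [hstep, ih rest [] _ (by simpa using Nat.le_of_succ_le_succ h)]
        obtain ⟨g, gs, hg⟩ : ∃ g gs, splitC rest = g :: gs := by
          cases hs : splitC rest with
          | nil => exact absurd hs (splitC_ne_nil rest)
          | cons g gs => exact ⟨g, gs, rfl⟩
        simp [splitC, hg]
      · have hstep : PySem.Chars.splitOn.go [','] (n+1) (c :: rest) cur acc
            = PySem.Chars.splitOn.go [','] n rest (c :: cur) acc := by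
          simp only [PySem.Chars.splitOn.go]
          rw [if_neg (by simp [List.isPrefixOf]; exact fun e => hc e.symm)]
        rw [hstep, ih rest (c :: cur) _ (by simpa using Nat.le_of_succ_le_succ h)]
        obtain ⟨g, gs, hg⟩ : ∃ g gs, splitC rest = g :: gs := by
          cases hs : splitC rest with
          | nil => exact absurd hs (splitC_ne_nil rest)
          | cons g gs => exact ⟨g, gs, rfl⟩
        simp [splitC, hc, hg]

theorem splitOn_comma (s : List Char) : PySem.Chars.splitOn s [','] = splitC s := by
  unfold PySem.Chars.splitOn
  rw [go_comma (s.length + 1) s [] [] (by omega)]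
  obtain ⟨g, gs, hg⟩ : ∃ g gs, splitC s = g :: gs := by
    cases hs : splitC s with
    | nil => exact absurd hs (splitC_ne_nil s)
    | cons g gs => exact ⟨g, gs, rfl⟩
  simp [hg]

theorem splitC_no_comma (l : List Char) (h : ',' ∉ l) : splitC l = [l] := by
  induction l with
  | nil => simp [splitC]
  | cons c rest ih =>
    have hc : c ≠ ',' := by intro e; exact h (by simp [e])
    simp [splitC, hc, ih (by intro m; exact h (by simp [m]))]

theorem splitC_append (g rest : List Char) (h : ',' ∉ g) :
    splitC (g ++ ',' :: rest) = g :: splitC rest := by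
  induction g with
  | nil => simp [splitC]
  | cons c t ih =>
    have hc : c ≠ ',' := by intro e; exact h (by simp [e])
    simp only [List.cons_append, splitC, if_neg hc, ih (by intro m; exact h (by simp [m]))]

theorem splitC_two_le (l : List Char) (h : ',' ∈ l) : 2 ≤ (splitC l).length := by
  induction l with
  | nil => simp at h
  | cons c rest ih =>
    by_cases hc : c = ','
    · subst hc
      have := splitC_ne_nil rest
      simp only [splitC]
      cases hs : splitC rest with
      | nil => exact absurd hs this
      | cons g gs => simp
    · have hm : ',' ∈ rest := by rcases List.mem_cons.mp h with e | m; exact absurd e.symm hc; exact m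
      obtain ⟨g, gs, hg⟩ : ∃ g gs, splitC rest = g :: gs := by
        cases hs : splitC rest with
        | nil => exact absurd hs (splitC_ne_nil rest)
        | cons g gs => exact ⟨g, gs, rfl⟩
      have := ih hm
      simp only [splitC, if_neg hc, hg] at this ⊢
      simpa using this

-- find on a single-character needle
theorem find_comma_split (rev : List Char) (h : 0 ≤ PySem.Chars.find rev [',']) :
    ',' ∉ rev.take (PySem.Chars.find rev [',']).toNat ∧
    rev = rev.take (PySem.Chars.find rev [',']).toNat ++
      ',' :: rev.drop ((PySem.Chars.find rev [',']).toNat + 1) := by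
  obtain ⟨hpre, hmin⟩ := PySem.Chars.find_spec h
  set n := (PySem.Chars.find rev [',']).toNat with hn
  constructor
  · intro hmem
    obtain ⟨i, hi, hget⟩ := List.mem_iff_getElem.mp hmem
    have hilen : i < rev.length := lt_of_lt_of_le hi (by simp)
    have hin : i < n := by
      have := hi; simp only [List.length_take] at this; omega
    apply hmin i hin
    have : rev.drop i = ',' :: rev.drop (i+1) := by
      rw [List.drop_eq_getElem_cons hilen]
      congr 1
      rw [← hget]
      simp [List.getElem_take]
    simp [this]
  · obtain ⟨t, ht⟩ := hpre
    have hnl : n < rev.length := by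
      rcases Nat.lt_or_ge n rev.length with h' | h'
      · exact h'
      · exfalso
        have : rev.drop n = [] := List.drop_eq_nil_of_le h'
        rw [this] at ht; simp at ht
    have hh : rev[n]? = some ',' := by
      rw [← List.head?_drop, ← ht]; rfl
    have hgn : rev[n] = ',' := by
      rw [List.getElem?_eq_getElem hnl] at hh
      injection hh
    have hdropn : rev.drop n = ',' :: rev.drop (n + 1) := by
      rw [List.drop_eq_getElem_cons hnl, hgn]
    conv_lhs => rw [← List.take_append_drop n rev]
    rw [hdropn]

def grpOK (g : List Char) : Bool := PySem.Chars.strIsdigit g && g.length % 3 == 0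

theorem commaLoopA_eq_def (rev : List Char) : commaLoopA rev =
    if 0 < PySem.Chars.find rev [','] ∧ PySem.Int.mod (PySem.Chars.find rev [',']) 3 = 0 ∧
        PySem.Chars.strIsdigit (PySem.List.slice rev none (some (PySem.Chars.find rev [',']))) = true then
      commaLoopA (PySem.List.slice rev (some (PySem.Chars.find rev [','] + 1)) none)
    else
      (PySem.Chars.find rev [','] == -1) && PySem.Chars.strIsdigit rev := by
  rw [commaLoopA]
  split <;> rfl

theorem mod3_iff (k : Int) (n : Nat) (hk : k = (n : Int)) :
    PySem.Int.mod k 3 = 0 ↔ n % 3 = 0 := by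
  rw [PySem.Int.mod_eq_zero_iff_dvd, hk]
  omega

theorem commaLoopA_eq (rev : List Char) :
    commaLoopA rev = ((splitC rev).dropLast.all grpOK &&
      PySem.Chars.strIsdigit ((splitC rev).getLastD [])) := by
  induction rev using commaLoopA.induct with
  | case1 rev idx h ih =>
    simp only [idx] at h ih
    rw [commaLoopA_eq_def, if_pos h]
    obtain ⟨hpos, hmod, hdig⟩ := h
    have h0 : (0:Int) ≤ PySem.Chars.find rev [','] := le_of_lt hpos
    obtain ⟨hnog, hsplit⟩ := find_comma_split rev h0
    set n := (PySem.Chars.find rev [',']).toNat with hn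
    have hcast : PySem.Chars.find rev [','] = (n : Int) := by omega
    have hslice_to : PySem.List.slice rev none (some (PySem.Chars.find rev [','])) = rev.take n :=
      PySem.List.slice_to rev h0
    have hslice_from :
        PySem.List.slice rev (some (PySem.Chars.find rev [','] + 1)) none = rev.drop (n + 1) := by
      rw [PySem.List.slice_from rev (by omega)]
      congr 1
      omega
    rw [hslice_from] at ih ⊢
    rw [ih]
    conv_rhs => rw [hsplit]
    rw [splitC_append _ _ hnog]
    have hne := splitC_ne_nil (rev.drop (n + 1))
    have hgOK : grpOK (rev.take n) = true := by
      rw [hslice_to] at hdig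
      have hnle : n ≤ rev.length := by
        have := PySem.Chars.find_le_length rev [',']
        omega
      have hn3 : n % 3 = 0 := (mod3_iff _ n hcast).mp hmod
      simp [grpOK, hdig, List.length_take, Nat.min_eq_left hnle, hn3]
    cases hs : splitC (rev.drop (n + 1)) with
    | nil => exact absurd hs hne
    | cons g gs => simp [hgOK]
  | case2 rev idx h =>
    simp only [idx] at h
    rw [commaLoopA_eq_def, if_neg h]
    rcases eq_or_lt_of_le (PySem.Chars.neg_one_le_find rev [',']) with heq | hgt
    · -- idx = -1 : no comma in rev
      have hnc : ',' ∉ rev := by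
        intro hm
        exact (PySem.Chars.find_eq_neg_one_iff rev [',']).mp heq.symm
          ((List.singleton_infix_iff ',' rev).mpr hm)
      rw [splitC_no_comma rev hnc]
      simp [← heq]
    · -- 0 ≤ idx : a comma remains, the loop fell out with False
      have h0 : (0:Int) ≤ PySem.Chars.find rev [','] := by omega
      obtain ⟨hnog, hsplit⟩ := find_comma_split rev h0
      set n := (PySem.Chars.find rev [',']).toNat with hn
      have hcast : PySem.Chars.find rev [','] = (n : Int) := by omega
      have hnle : n ≤ rev.length := by
        have := PySem.Chars.find_le_length rev [',']
        omega
      have hfalse : (PySem.Chars.find rev [','] == -1) = false := by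
        simp; omega
      rw [hfalse, Bool.false_and]
      conv_rhs => rw [hsplit]
      rw [splitC_append _ _ hnog]
      have hne := splitC_ne_nil (rev.drop (n + 1))
      have hgBad : grpOK (rev.take n) = false := by
        by_cases hz : n = 0
        · simp [hz, grpOK, PySem.Chars.strIsdigit]
        · have hpos : 0 < PySem.Chars.find rev [','] := by omega
          have hslice_to : PySem.List.slice rev none (some (PySem.Chars.find rev [','])) = rev.take n :=
            PySem.List.slice_to rev h0
          by_cases hm3 : PySem.Int.mod (PySem.Chars.find rev [',']) 3 = 0
          · have hd : PySem.Chars.strIsdigit (rev.take n) = false := by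
              by_contra hd'
              exact h ⟨hpos, hm3, by rw [hslice_to]; simpa using hd'⟩
            simp [grpOK, hd]
          · have hlen : ¬ (min n rev.length % 3 = 0) := by
              intro hl
              apply hm3
              rw [mod3_iff _ n hcast]
              rwa [Nat.min_eq_left hnle] at hl
            simp [grpOK, List.length_take, hlen]
      cases hs : splitC (rev.drop (n + 1)) with
      | nil => exact absurd hs hne
      | cons g gs => simp [hgBad]

theorem strIsdigit_reverse (l : List Char) :
    PySem.Chars.strIsdigit l.reverse = PySem.Chars.strIsdigit l := by
  simp [PySem.Chars.strIsdigit]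

theorem splitC_concat (xs : List Char) (c : Char) :
    splitC (xs ++ [c]) = if c = ',' then splitC xs ++ [[]]
      else (splitC xs).dropLast ++ [(splitC xs).getLastD [] ++ [c]] := by
  by_cases hc : c = ','
  · subst hc
    rw [if_pos rfl]
    induction xs with
    | nil => simp [splitC]
    | cons x t ih =>
      obtain ⟨g, gs, hg⟩ : ∃ g gs, splitC t = g :: gs := by
        cases hs : splitC t with
        | nil => exact absurd hs (splitC_ne_nil t)
        | cons g gs => exact ⟨g, gs, rfl⟩
      by_cases hx : x = ','
      · subst hx; simp [splitC, ih]
      · simp [splitC, hx, ih, hg]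
  · rw [if_neg hc]
    induction xs with
    | nil => simp [splitC, hc]
    | cons x t ih =>
      obtain ⟨g, gs, hg⟩ : ∃ g gs, splitC t = g :: gs := by
        cases hs : splitC t with
        | nil => exact absurd hs (splitC_ne_nil t)
        | cons g gs => exact ⟨g, gs, rfl⟩
      by_cases hx : x = ','
      · subst hx
        simp [splitC, ih, hg]
      · simp only [List.cons_append, splitC, if_neg hx, ih, hg]
        cases gs with
        | nil => simp
        | cons g2 gs2 => simp

theorem splitC_reverse (l : List Char) :
    splitC l.reverse = ((splitC l).map List.reverse).reverse := by
  induction l with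
  | nil => simp [splitC]
  | cons c t ih =>
    obtain ⟨g, gs, hg⟩ : ∃ g gs, splitC t = g :: gs := by
      cases hs : splitC t with
      | nil => exact absurd hs (splitC_ne_nil t)
      | cons g gs => exact ⟨g, gs, rfl⟩
    rw [List.reverse_cons, splitC_concat, ih]
    by_cases hc : c = ','
    · simp [splitC, hc, hg]
    · simp only [if_neg hc, splitC, hg]
      cases gs with
      | nil => simp
      | cons g2 gs2 => simp

theorem all_grpOK_rev (gs : List (List Char)) :
    (gs.map List.reverse).all grpOK = gs.all grpOK := by
  induction gs with
  | nil => rfl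
  | cons p ps ih => simp [ih, grpOK, strIsdigit_reverse]

theorem comma_key (s : List Char) (hnd : PySem.Chars.strIsdigit s = false) :
    commaLoopA s.reverse = commaSplitB s := by
  rw [commaLoopA_eq, splitC_reverse]
  unfold commaSplitB
  rw [splitOn_comma]
  by_cases hm : ',' ∈ s
  · have h2 := splitC_two_le s hm
    obtain ⟨g, gs, hg⟩ : ∃ g gs, splitC s = g :: gs := by
      cases hs : splitC s with
      | nil => exact absurd hs (splitC_ne_nil s)
      | cons g gs => exact ⟨g, gs, rfl⟩
    rw [hg] at h2 ⊢
    cases gs with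
    | nil => simp at h2
    | cons g2 gs2 =>
      have hrw : ((g :: g2 :: gs2).map List.reverse).reverse
          = ((g2 :: gs2).map List.reverse).reverse ++ [g.reverse] := by simp
      rw [hrw, List.dropLast_concat, List.getLastD_concat, List.all_reverse,
        all_grpOK_rev, strIsdigit_reverse]
      simp only [List.headD_cons, List.tail_cons, List.length_cons,
        show (fun p => PySem.Chars.strIsdigit p && (p.length % 3 == 0)) = grpOK from rfl]
      cases PySem.Chars.strIsdigit g <;> cases (g2 :: gs2).all grpOK <;> simp
  · have hone : splitC s = [s] := splitC_no_comma s hm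
    rw [hone]
    simp [strIsdigit_reverse, hnd]

-- ===== VERDICT (by name: the statement is the Claim_ definition above) =====
theorem is_positive_number_spec : Claim_equal_is_positive_number := by
  intro string neg _
  unfold Spec_is_positive_number is_positive_number is_positive_number_alt
  simp only [PySem.List.slice?_none_none_neg_one, Option.getD_some]
  set s := string.toList with hs
  by_cases he : s.isEmpty
  · simp [he]
  · by_cases hd : PySem.Chars.strIsdigit s
    · simp [he, hd]
    · have hnd : PySem.Chars.strIsdigit s = false := by simpa using hd
      simp only [hd, if_neg (by simp [he] : ¬ (s.isEmpty = true))]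
      rw [comma_key s hnd]
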